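-- pv_equiv track=rewrite | github.com/yujiaxie000/HierarchicalModularTSP | solver.py | mergeTrace
-- ===== SOURCE A (Python) =====
-- def mergeTrace(permutationDict):
-- 	permutation = []
-- 	def dfs(curr):
-- 		if curr in permutationDict:
-- 			for child in permutationDict[curr]:
-- 				isTerminal = dfs(str(child))
-- 				if isTerminal:
-- 					permutation.append(child)
-- 			return False
-- 		else:
-- 			return True
--
-- 	dfs("0")
-- 	return permutation
-- ===== SOURCE B (Python) =====
-- def mergeTrace(permutationDict):
--     if "0" not in permutationDict:
--         return []
--     result = []
--     stack = list(reversed(permutationDict["0"]))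
--     while stack:
--         x = stack.pop()
--         key = str(x)
--         if key in permutationDict:
--             stack.extend(reversed(permutationDict[key]))
--         else:
--             result.append(x)
--     return result
-- ===== Notes on version B (the rewrite author's own statement) =====
-- stated objective: idiomatic
-- what changed: A's recursive nested dfs that mutates a shared list is replaced by an iterative DFS with an explicit stack (seed with reversed root children, pop, push reversed children of keys, append non-key leaves), removing recursion entirely.
import Mathlib
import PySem

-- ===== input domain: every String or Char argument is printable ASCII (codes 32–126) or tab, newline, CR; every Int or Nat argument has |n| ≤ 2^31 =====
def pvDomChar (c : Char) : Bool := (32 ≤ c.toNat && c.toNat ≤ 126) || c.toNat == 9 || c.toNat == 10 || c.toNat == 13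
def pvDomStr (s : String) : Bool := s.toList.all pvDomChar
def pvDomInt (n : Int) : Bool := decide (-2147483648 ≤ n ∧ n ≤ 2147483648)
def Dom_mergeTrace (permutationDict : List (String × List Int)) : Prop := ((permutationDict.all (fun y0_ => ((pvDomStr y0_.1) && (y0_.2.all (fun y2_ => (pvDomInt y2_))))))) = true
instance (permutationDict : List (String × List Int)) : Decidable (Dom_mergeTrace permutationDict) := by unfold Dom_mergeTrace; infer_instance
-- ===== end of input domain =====

-- B replaces A's recursive DFS (nested function mutating a shared list) by an iterative
-- explicit-stack DFS loop: same return value on every acyclic input (Pre_), no recursion.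

-- dict lookup, first match (Python dict membership/subscript)
def pvGet (d : List (String × List Int)) (k : String) : Option (List Int) :=
  (PySem.Dict.mk d).get? k

-- ===== PORT A =====
-- literal port of A's nested `dfs`; the Nat argument is a fuel guard (recursion depth
-- bound) that merely makes the recursion total: d.length + 2 suffices on every input
-- admitted by Pre_ (proved below); the pair is (permutation so far, isTerminal).
def pvDfsA (d : List (String × List Int)) : Nat → String → List Int → List Int × Bool
  | 0, _, acc => (acc, false)
  | fuel + 1, curr, acc =>
    match pvGet d curr with
    | some children =>
      (children.foldl (fun a c =>
          let r := pvDfsA d fuel (PySem.Int.toStr c) a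
          if r.2 then r.1 ++ [c] else r.1) acc, false)
    | none => (acc, true)

def mergeTrace (permutationDict : List (String × List Int)) : List Int :=
  (pvDfsA permutationDict (permutationDict.length + 2) "0" []).1

-- ===== PORT B =====
-- fuel guard for B's while-loop: fueled node count of the DFS tree rooted at a key
-- (the loop below runs exactly this many iterations minus one on Pre_ inputs)
def pvTsz (d : List (String × List Int)) : Nat → String → Nat
  | 0, _ => 1
  | fuel + 1, k =>
    match pvGet d k with
    | some children => 1 + (children.map (fun c => pvTsz d fuel (PySem.Int.toStr c))).sum
    | none => 1

-- the while-loop of Source B; the Lean list keeps the TOP of Python's stack at its HEAD,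
-- so Python's `stack.extend(reversed(children)); stack.pop()` is `children ++ st` here.
-- The Nat argument is a fuel guard making the loop total; it suffices on Pre_ inputs.
def pvLoopB (d : List (String × List Int)) : Nat → List Int → List Int → List Int
  | 0, _, acc => acc
  | _ + 1, [], acc => acc
  | fuel + 1, x :: st, acc =>
    match pvGet d (PySem.Int.toStr x) with
    | some children => pvLoopB d fuel (children ++ st) acc
    | none => pvLoopB d fuel st (acc ++ [x])

def mergeTrace_alt (permutationDict : List (String × List Int)) : List Int :=
  match pvGet permutationDict "0" with
  | none => []
  | some rootChildren =>
      pvLoopB permutationDict (pvTsz permutationDict (permutationDict.length + 2) "0")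
        rootChildren []

-- ===== PRECONDITION & SPEC =====
-- graph view of the dict: key-successors of a node
def pvKey (d : List (String × List Int)) (k : String) : Bool := (pvGet d k).isSome
def pvCh (d : List (String × List Int)) (k : String) : List Int := (pvGet d k).getD []
def pvSucc (d : List (String × List Int)) (k : String) : List String :=
  ((pvCh d k).map PySem.Int.toStr).filter (fun s => pvKey d s)
def pvStep (d : List (String × List Int)) (S : List String) : List String :=
  (S ++ S.flatMap (pvSucc d)).dedup
def pvReachAux (d : List (String × List Int)) : Nat → List String → List String
  | 0, S => S
  | n + 1, S => pvReachAux d n (pvStep d S)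
-- keys reachable from k in at least one step / everything reachable from "0"
def pvReachP (d : List (String × List Int)) (k : String) : List String :=
  pvReachAux d (d.length + 1) (pvSucc d k)
def pvR0 (d : List (String × List Int)) : List String :=
  pvReachAux d (d.length + 1) ["0"]

-- Pre_ excludes exactly the dicts whose key graph has a cycle reachable from "0":
-- there A's recursion never terminates (RecursionError), so A returns no value.
def Pre_mergeTrace (permutationDict : List (String × List Int)) : Prop :=
  ∀ k ∈ pvR0 permutationDict, k ∉ pvReachP permutationDict k
instance (permutationDict : List (String × List Int)) : Decidable (Pre_mergeTrace permutationDict) := by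
  unfold Pre_mergeTrace; infer_instance

def pvWitness_mergeTrace : (List (String × List Int)) := [("0", [1, 2]), ("1", [3, 4])]

def Spec_mergeTrace (permutationDict : List (String × List Int)) (out : List Int) : Prop := out = mergeTrace_alt permutationDict
instance (permutationDict : List (String × List Int)) (out : List Int) : Decidable (Spec_mergeTrace permutationDict out) := by unfold Spec_mergeTrace; infer_instance

-- ===== CLAIM (what is proved, stated in full; the proofs are below) =====
def Claim_equal_mergeTrace : Prop := ∀ (permutationDict : List (String × List Int)), Dom_mergeTrace permutationDict → Pre_mergeTrace permutationDict → Spec_mergeTrace permutationDict (mergeTrace permutationDict)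

-- ===== LEMMAS AND PROOFS =====

-- T is closed under the successor relation
def pvClosed (d : List (String × List Int)) (T : List String) : Prop :=
  ∀ y ∈ T, ∀ s ∈ pvSucc d y, s ∈ T

theorem pv_subset_step (d : List (String × List Int)) (S : List String) : S ⊆ pvStep d S := by
  intro x hx; simp [pvStep]; exact Or.inl hx

theorem pv_subset_reach (d : List (String × List Int)) (n : Nat) (S : List String) :
    S ⊆ pvReachAux d n S := by
  induction n generalizing S with
  | zero => exact fun _ h => h
  | succ n ih => exact fun x hx => ih (pvStep d S) (pv_subset_step d S hx)

theorem pv_reach_sub_closed (d : List (String × List Int)) (n : Nat) (S T : List String)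
    (hST : S ⊆ T) (hT : pvClosed d T) : pvReachAux d n S ⊆ T := by
  induction n generalizing S with
  | zero => exact hST
  | succ n ih =>
    refine ih (pvStep d S) ?_
    intro x hx
    simp [pvStep] at hx
    rcases hx with hx | ⟨y, hy, hxy⟩
    · exact hST hx
    · exact hT y (hST hy) x hxy

theorem pv_key_mem_keys (d : List (String × List Int)) (k : String)
    (h : pvKey d k = true) : k ∈ d.map Prod.fst := by
  unfold pvKey pvGet at h
  rw [Option.isSome_iff_ne_none] at h
  have h2 := (PySem.Dict.get?_eq_none_iff_not_mem_keys (d := PySem.Dict.mk d) (k := k))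
  simp [PySem.Dict.keys] at h2
  by_contra hk
  exact h (h2.2 (by simpa using hk))

theorem pv_succ_sub_keys (d : List (String × List Int)) (k : String) :
    pvSucc d k ⊆ d.map Prod.fst := by
  intro s hs
  simp [pvSucc] at hs
  exact pv_key_mem_keys d s hs.2

theorem pv_keys_closed (d : List (String × List Int)) : pvClosed d (d.map Prod.fst) :=
  fun y _ _ hs => pv_succ_sub_keys d y hs

theorem pv_dlen_mono {S T : List String} (h : S ⊆ T) : S.dedup.length ≤ T.dedup.length := by
  rw [← List.card_toFinset, ← List.card_toFinset]
  exact Finset.card_le_card (fun x hx => by simp at hx ⊢; exact h hx)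

theorem pv_dlen_lt {S T : List String} (h : S ⊆ T) (x : String) (hxT : x ∈ T) (hxS : x ∉ S) :
    S.dedup.length < T.dedup.length := by
  rw [← List.card_toFinset, ← List.card_toFinset]
  refine Finset.card_lt_card ⟨fun y hy => by simp at hy ⊢; exact h hy, fun hc => ?_⟩
  exact hxS (by simpa using hc (by simpa using hxT))

theorem pv_reach_comp (d : List (String × List Int)) (m n : Nat) (S : List String) :
    pvReachAux d (m + n) S = pvReachAux d n (pvReachAux d m S) := by
  induction m generalizing S with
  | zero => simp [pvReachAux]
  | succ m ih =>
    have : m + 1 + n = (m + n) + 1 := by omega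
    rw [this]
    show pvReachAux d (m + n) (pvStep d S) = _
    rw [ih (pvStep d S)]
    rfl

theorem pv_reach_succ_right (d : List (String × List Int)) (n : Nat) (S : List String) :
    pvReachAux d (n + 1) S = pvStep d (pvReachAux d n S) := by
  induction n generalizing S with
  | zero => rfl
  | succ n ih =>
    show pvReachAux d (n + 1) (pvStep d S) = _
    rw [ih (pvStep d S)]
    rfl

-- the pigeonhole closure lemma: after d.length + 1 steps the computed set is closed
theorem pv_reach_closed (d : List (String × List Int)) (S : List String) :
    pvClosed d (pvReachAux d (d.length + 1) S) := by
  by_contra hnc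
  have hnot : ∀ i ≤ d.length + 1, ¬ pvClosed d (pvReachAux d i S) := by
    intro i hi hci
    apply hnc
    have hcomp : pvReachAux d (d.length + 1) S
        = pvReachAux d (d.length + 1 - i) (pvReachAux d i S) := by
      rw [← pv_reach_comp]; congr 1; omega
    have h1 : pvReachAux d (d.length + 1) S ⊆ pvReachAux d i S := by
      rw [hcomp]; exact pv_reach_sub_closed d _ _ _ (fun _ h => h) hci
    have h2 : pvReachAux d i S ⊆ pvReachAux d (d.length + 1) S := by
      rw [hcomp]; exact pv_subset_reach d _ _
    intro y hy s hs
    exact h2 (hci y (h1 hy) s hs)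
  have hgrow : ∀ i ≤ d.length + 1, S.dedup.length + i ≤ (pvReachAux d i S).dedup.length := by
    intro i
    induction i with
    | zero => intro _; simp [pvReachAux]
    | succ i ih =>
      intro hi
      have h1 := ih (by omega)
      have hnc' := hnot i (by omega)
      unfold pvClosed at hnc'
      push_neg at hnc'
      obtain ⟨y, hy, s, hs, hsn⟩ := hnc'
      have hmem : s ∈ pvReachAux d (i + 1) S := by
        rw [pv_reach_succ_right]
        simp [pvStep]
        exact Or.inr ⟨y, hy, hs⟩
      have hsub : pvReachAux d i S ⊆ pvReachAux d (i + 1) S := by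
        rw [pv_reach_succ_right]; exact pv_subset_step d _
      have := pv_dlen_lt hsub s hmem hsn
      omega
  have hupper : (pvReachAux d (d.length + 1) S).dedup.length ≤ S.dedup.length + d.length := by
    have h1 : pvReachAux d (d.length + 1) S ⊆ S ++ d.map Prod.fst :=
      pv_reach_sub_closed d _ _ _ (by simp)
        (fun y _ s hs => by simp; exact Or.inr (by simpa using pv_succ_sub_keys d y hs))
    have h2 : (S ++ d.map Prod.fst).dedup.length
        ≤ S.dedup.length + (d.map Prod.fst).dedup.length := by
      rw [← List.card_toFinset, ← List.card_toFinset, ← List.card_toFinset]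
      simpa using Finset.card_union_le S.toFinset (d.map Prod.fst).toFinset
    have h3 : (d.map Prod.fst).dedup.length ≤ d.length := by
      have := (List.dedup_sublist (d.map Prod.fst)).length_le
      simpa using this
    have := pv_dlen_mono h1
    omega
  have := hgrow (d.length + 1) le_rfl
  omega

-- measure for the strong inductions
def pvMu (d : List (String × List Int)) (k : String) : Nat := (pvReachP d k).dedup.length

theorem pv_succ_R0 (d : List (String × List Int)) {k : String} (hk : k ∈ pvR0 d) :
    ∀ s ∈ pvSucc d k, s ∈ pvR0 d :=
  fun s hs => pv_reach_closed d ["0"] k hk s hs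

theorem pv_zero_R0 (d : List (String × List Int)) : "0" ∈ pvR0 d :=
  pv_subset_reach d _ _ (by simp)

theorem pv_reachP_sub (d : List (String × List Int)) {k s : String} (hs : s ∈ pvSucc d k) :
    pvReachP d s ⊆ pvReachP d k := by
  have hsk : s ∈ pvReachP d k := pv_subset_reach d _ _ hs
  exact pv_reach_sub_closed d _ _ _ (fun t ht => pv_reach_closed d (pvSucc d k) s hsk t ht)
    (pv_reach_closed d (pvSucc d k))

theorem pv_mu_lt (d : List (String × List Int)) (hPre : Pre_mergeTrace d) {k s : String}
    (hk : k ∈ pvR0 d) (hs : s ∈ pvSucc d k) : pvMu d s < pvMu d k := by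
  have hsR0 : s ∈ pvR0 d := pv_succ_R0 d hk s hs
  exact pv_dlen_lt (pv_reachP_sub d hs) s (pv_subset_reach d _ _ hs) (hPre s hsR0)

theorem pv_mu_le (d : List (String × List Int)) (k : String) : pvMu d k ≤ d.length := by
  have h1 : pvReachP d k ⊆ d.map Prod.fst :=
    pv_reach_sub_closed d _ _ _ (pv_succ_sub_keys d k) (pv_keys_closed d)
  calc (pvReachP d k).dedup.length ≤ (d.map Prod.fst).dedup.length := pv_dlen_mono h1
    _ ≤ (d.map Prod.fst).length := (List.dedup_sublist _).length_le
    _ = d.length := List.length_map _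

-- A-side: one child's contribution to the permutation list
def pvE (d : List (String × List Int)) (f : Nat) (c : Int) : List Int :=
  (pvDfsA d f (PySem.Int.toStr c) []).1 ++
    (if (pvDfsA d f (PySem.Int.toStr c) []).2 then [c] else [])

theorem pv_dfs_nonkey (d : List (String × List Int)) (f : Nat) (k : String) (acc : List Int)
    (h : pvGet d k = none) : pvDfsA d (f + 1) k acc = (acc, true) := by
  simp [pvDfsA, h]

theorem pv_dfs_key (d : List (String × List Int)) (f : Nat) (k : String) (ch : List Int)
    (acc : List Int) (h : pvGet d k = some ch) :
    pvDfsA d (f + 1) k acc = (acc ++ ch.flatMap (pvE d f), false) := by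
  induction f generalizing k ch acc with
  | zero => simp [pvDfsA, h, pvE]
  | succ n ih =>
    have hhead : pvDfsA d (n + 1 + 1) k acc = (ch.foldl (fun a c =>
        let r := pvDfsA d (n + 1) (PySem.Int.toStr c) a
        if r.2 then r.1 ++ [c] else r.1) acc, false) := by
      show (match pvGet d k with
            | some children => (children.foldl (fun a c =>
                let r := pvDfsA d (n + 1) (PySem.Int.toStr c) a
                if r.2 then r.1 ++ [c] else r.1) acc, false)
            | none => (acc, true)) = _
      rw [h]
    rw [hhead]
    have hstep : ∀ (a : List Int), ∀ c ∈ ch,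
        (let r := pvDfsA d (n + 1) (PySem.Int.toStr c) a
         if r.2 then r.1 ++ [c] else r.1) = a ++ pvE d (n + 1) c := by
      intro a c _
      cases hc2 : pvGet d (PySem.Int.toStr c) with
      | none => simp [pv_dfs_nonkey d n _ _ hc2, pvE]
      | some ch' => simp [ih _ _ _ hc2, pvE]
    rw [PySem.List.foldl_congr_mem ch _ (fun a c => a ++ pvE d (n + 1) c) acc hstep,
        PySem.List.foldl_append_eq_flatMap]

theorem pv_dfs_fuel (d : List (String × List Int)) (hPre : Pre_mergeTrace d) :
    ∀ m k, k ∈ pvR0 d → pvMu d k ≤ m → ∀ f g, pvMu d k + 2 ≤ f → pvMu d k + 2 ≤ g →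
      pvDfsA d f k [] = pvDfsA d g k [] := by
  intro m
  induction m using Nat.strong_induction_on with
  | _ m ih =>
  intro k hk hm f g hf hg
  obtain ⟨f1, rfl⟩ : ∃ f1, f = f1 + 1 := ⟨f - 1, by omega⟩
  obtain ⟨g1, rfl⟩ : ∃ g1, g = g1 + 1 := ⟨g - 1, by omega⟩
  cases hkey : pvGet d k with
  | none => rw [pv_dfs_nonkey d _ _ _ hkey, pv_dfs_nonkey d _ _ _ hkey]
  | some ch =>
    rw [pv_dfs_key d _ _ _ _ hkey, pv_dfs_key d _ _ _ _ hkey]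
    refine Prod.ext ?_ rfl
    show ([] : List Int) ++ _ = ([] : List Int) ++ _
    simp only [List.nil_append]
    refine List.flatMap_congr (fun c hc => ?_)
    cases hc2 : pvGet d (PySem.Int.toStr c) with
    | none =>
      obtain ⟨f2, rfl⟩ : ∃ f2, f1 = f2 + 1 := ⟨f1 - 1, by omega⟩
      obtain ⟨g2, rfl⟩ : ∃ g2, g1 = g2 + 1 := ⟨g1 - 1, by omega⟩
      simp [pvE, pv_dfs_nonkey d _ _ _ hc2]
    | some ch' =>
      have hsucc : PySem.Int.toStr c ∈ pvSucc d k := by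
        unfold pvSucc
        have hch : pvCh d k = ch := by simp [pvCh, hkey]
        rw [hch]
        exact List.mem_filter.2 ⟨List.mem_map.2 ⟨c, hc, rfl⟩, by simp [pvKey, hc2]⟩
      have hlt := pv_mu_lt d hPre hk hsucc
      have hR0 := pv_succ_R0 d hk _ hsucc
      have heq := ih (pvMu d (PySem.Int.toStr c)) (by omega) _ hR0 le_rfl f1 g1
        (by omega) (by omega)
      simp [pvE, heq]

theorem pv_tsz_pos (d : List (String × List Int)) (f : Nat) (k : String) : 1 ≤ pvTsz d f k := by
  cases f with
  | zero => simp [pvTsz]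
  | succ f => simp only [pvTsz]; cases pvGet d k <;> simp

theorem pv_tsz_nonkey (d : List (String × List Int)) (f : Nat) (k : String)
    (h : pvGet d k = none) : pvTsz d f k = 1 := by
  cases f with
  | zero => rfl
  | succ f => simp [pvTsz, h]

theorem pv_tsz_fuel (d : List (String × List Int)) (hPre : Pre_mergeTrace d) :
    ∀ m k, k ∈ pvR0 d → pvMu d k ≤ m → ∀ f g, pvMu d k + 1 ≤ f → pvMu d k + 1 ≤ g →
      pvTsz d f k = pvTsz d g k := by
  intro m
  induction m using Nat.strong_induction_on with
  | _ m ih =>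
  intro k hk hm f g hf hg
  obtain ⟨f1, rfl⟩ : ∃ f1, f = f1 + 1 := ⟨f - 1, by omega⟩
  obtain ⟨g1, rfl⟩ : ∃ g1, g = g1 + 1 := ⟨g - 1, by omega⟩
  cases hkey : pvGet d k with
  | none => rw [pv_tsz_nonkey d _ _ hkey, pv_tsz_nonkey d _ _ hkey]
  | some ch =>
    simp only [pvTsz, hkey]
    congr 1
    congr 1
    refine List.map_congr_left (fun c hc => ?_)
    cases hc2 : pvGet d (PySem.Int.toStr c) with
    | none => rw [pv_tsz_nonkey d _ _ hc2, pv_tsz_nonkey d _ _ hc2]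
    | some ch' =>
      have hsucc : PySem.Int.toStr c ∈ pvSucc d k := by
        unfold pvSucc
        have hch : pvCh d k = ch := by simp [pvCh, hkey]
        rw [hch]
        exact List.mem_filter.2 ⟨List.mem_map.2 ⟨c, hc, rfl⟩, by simp [pvKey, hc2]⟩
      have hlt := pv_mu_lt d hPre hk hsucc
      have hR0 := pv_succ_R0 d hk _ hsucc
      exact ih (pvMu d (PySem.Int.toStr c)) (by omega) _ hR0 le_rfl f1 g1 (by omega) (by omega)

theorem pv_tsz_key_F (d : List (String × List Int)) (hPre : Pre_mergeTrace d) {k : String}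
    (hk : k ∈ pvR0 d) {ch : List Int} (h : pvGet d k = some ch) :
    pvTsz d (d.length + 2) k
      = 1 + (ch.map (fun c => pvTsz d (d.length + 2) (PySem.Int.toStr c))).sum := by
  have hhead : pvTsz d (d.length + 1 + 1) k
      = 1 + (ch.map (fun c => pvTsz d (d.length + 1) (PySem.Int.toStr c))).sum := by
    show (match pvGet d k with
          | some children =>
              1 + (children.map (fun c => pvTsz d (d.length + 1) (PySem.Int.toStr c))).sum
          | none => 1) = _
    rw [h]
  show pvTsz d (d.length + 1 + 1) k = _
  rw [hhead]
  congr 1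
  congr 1
  refine List.map_congr_left (fun c hc => ?_)
  cases hc2 : pvGet d (PySem.Int.toStr c) with
  | none => rw [pv_tsz_nonkey d _ _ hc2, pv_tsz_nonkey d _ _ hc2]
  | some ch' =>
    have hsucc : PySem.Int.toStr c ∈ pvSucc d k := by
      unfold pvSucc
      have hch : pvCh d k = ch := by simp [pvCh, h]
      rw [hch]
      exact List.mem_filter.2 ⟨List.mem_map.2 ⟨c, hc, rfl⟩, by simp [pvKey, hc2]⟩
    have hR0 := pv_succ_R0 d hk _ hsucc
    have hle := pv_mu_le d (PySem.Int.toStr c)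
    exact pv_tsz_fuel d hPre (pvMu d (PySem.Int.toStr c)) _ hR0 le_rfl
      (d.length + 1) (d.length + 2) (by omega) (by omega)

-- B-side: the value a stack entry contributes to the output
def pvEv (d : List (String × List Int)) (x : Int) : List Int :=
  match pvGet d (PySem.Int.toStr x) with
  | some _ => (pvDfsA d (d.length + 2) (PySem.Int.toStr x) []).1
  | none => [x]

theorem pv_e_ev (d : List (String × List Int)) (hPre : Pre_mergeTrace d) {k : String}
    (hk : k ∈ pvR0 d) {ch : List Int} (h : pvGet d k = some ch) :
    ∀ c ∈ ch, pvE d (d.length + 1) c = pvEv d c := by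
  intro c hc
  cases hc2 : pvGet d (PySem.Int.toStr c) with
  | none =>
    simp [pvE, pvEv, hc2, pv_dfs_nonkey d d.length _ _ hc2]
  | some ch' =>
    have hsucc : PySem.Int.toStr c ∈ pvSucc d k := by
      unfold pvSucc
      have hch : pvCh d k = ch := by simp [pvCh, h]
      rw [hch]
      exact List.mem_filter.2 ⟨List.mem_map.2 ⟨c, hc, rfl⟩, by simp [pvKey, hc2]⟩
    have hlt := pv_mu_lt d hPre hk hsucc
    have hR0 := pv_succ_R0 d hk _ hsucc
    have hle := pv_mu_le d k
    have heq := pv_dfs_fuel d hPre (pvMu d (PySem.Int.toStr c)) _ hR0 le_rfl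
      (d.length + 1) (d.length + 2) (by omega) (by omega)
    simp only [pvE, heq, pvEv, hc2]
    rw [pv_dfs_key d (d.length + 1) _ _ _ hc2]
    simp

theorem pv_loopB_eq (d : List (String × List Int)) (hPre : Pre_mergeTrace d) :
    ∀ n (stack acc : List Int),
      (∀ x ∈ stack, ∀ ch, pvGet d (PySem.Int.toStr x) = some ch → PySem.Int.toStr x ∈ pvR0 d) →
      (stack.map (fun x => pvTsz d (d.length + 2) (PySem.Int.toStr x))).sum ≤ n →
      pvLoopB d n stack acc = acc ++ stack.flatMap (pvEv d) := by
  intro n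
  induction n with
  | zero =>
    intro stack acc hinv hsum
    cases stack with
    | nil => simp [pvLoopB]
    | cons x st =>
      exfalso
      have := pv_tsz_pos d (d.length + 2) (PySem.Int.toStr x)
      simp at hsum
      omega
  | succ n ih =>
    intro stack acc hinv hsum
    cases stack with
    | nil => simp [pvLoopB]
    | cons x st =>
      cases hx : pvGet d (PySem.Int.toStr x) with
      | none =>
        simp only [pvLoopB, hx]
        rw [ih st (acc ++ [x]) (fun y hy => hinv y (List.mem_cons_of_mem x hy))]
        · simp [pvEv, hx]
        · have h1 := pv_tsz_nonkey d (d.length + 2) _ hx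
          simp only [List.map_cons, List.sum_cons, h1] at hsum
          omega
      | some ch =>
        have hkR0 : PySem.Int.toStr x ∈ pvR0 d := hinv x List.mem_cons_self ch hx
        simp only [pvLoopB, hx]
        have hinv' : ∀ y ∈ ch ++ st, ∀ ch'', pvGet d (PySem.Int.toStr y) = some ch'' →
            PySem.Int.toStr y ∈ pvR0 d := by
          intro y hy ch'' hy2
          rcases List.mem_append.1 hy with hy | hy
          · refine pv_succ_R0 d hkR0 _ ?_
            unfold pvSucc
            have hch : pvCh d (PySem.Int.toStr x) = ch := by simp [pvCh, hx]
            rw [hch]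
            exact List.mem_filter.2 ⟨List.mem_map.2 ⟨y, hy, rfl⟩, by simp [pvKey, hy2]⟩
          · exact hinv y (List.mem_cons_of_mem x hy) ch'' hy2
        have hsum' : ((ch ++ st).map
            (fun y => pvTsz d (d.length + 2) (PySem.Int.toStr y))).sum ≤ n := by
          have hkey := pv_tsz_key_F d hPre hkR0 hx
          simp only [List.map_cons, List.sum_cons, hkey] at hsum
          simp only [List.map_append, List.sum_append]
          omega
        rw [ih (ch ++ st) acc hinv' hsum']
        have hx1 : pvEv d x = ch.flatMap (pvEv d) := by
          have h1 : pvEv d x = (pvDfsA d (d.length + 2) (PySem.Int.toStr x) []).1 := by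
            simp [pvEv, hx]
          rw [h1]
          rw [pv_dfs_key d (d.length + 1) _ _ _ hx]
          simp only [List.nil_append]
          exact List.flatMap_congr (fun c hc => pv_e_ev d hPre hkR0 hx c hc)
        simp [hx1, List.flatMap_append]

-- ===== VERDICT (by name: the statement is the Claim_ definition above) =====
theorem mergeTrace_spec : Claim_equal_mergeTrace := by
  intro d _ hPre
  unfold Spec_mergeTrace mergeTrace mergeTrace_alt
  cases h0 : pvGet d "0" with
  | none =>
    show (pvDfsA d (d.length + 1 + 1) "0" []).1 = _
    rw [pv_dfs_nonkey d _ _ _ h0]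
  | some rc =>
    have h0R : "0" ∈ pvR0 d := pv_zero_R0 d
    have hB : pvLoopB d (pvTsz d (d.length + 2) "0") rc [] = [] ++ rc.flatMap (pvEv d) := by
      refine pv_loopB_eq d hPre _ rc [] ?_ ?_
      · intro x hx ch hch
        refine pv_succ_R0 d h0R _ ?_
        unfold pvSucc
        have hch0 : pvCh d "0" = rc := by simp [pvCh, h0]
        rw [hch0]
        exact List.mem_filter.2 ⟨List.mem_map.2 ⟨x, hx, rfl⟩, by simp [pvKey, hch]⟩
      · have := pv_tsz_key_F d hPre h0R h0
        omega
    show (pvDfsA d (d.length + 1 + 1) "0" []).1 = _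
    rw [pv_dfs_key d _ _ _ _ h0]
    show [] ++ rc.flatMap (pvE d (d.length + 1)) = pvLoopB d (pvTsz d (d.length + 2) "0") rc []
    rw [hB]
    simp only [List.nil_append]
    exact List.flatMap_congr (fun c hc => pv_e_ev d hPre h0R h0 c hc)
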